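-- pv_equiv track=rewrite | github.com/Kliszek/AdventOfCode-2020 | Day14/main.py | floating
-- ===== SOURCE A (Python) =====
-- def bin_to_dec(number):
-- 	res = 0
-- 	i = len(number)-1
-- 	for x in number:
-- 		if x == "1":
-- 			res += (2**i)
-- 		i-=1
-- 	return res
--
-- def floating(number):
-- 	res = []
-- 	if number.count("X") == 0:
-- 		return [bin_to_dec(number)]
-- 	else:
-- 		ind = number.index("X")
-- 		str_lst = list(number)
-- 		str_lst[ind] = "0"
-- 		res.extend(floating("".join(str_lst)))
-- 		str_lst[ind] = "1"
-- 		res.extend(floating("".join(str_lst)))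
-- 		return res
-- ===== SOURCE B (Python) =====
-- def floating(number):
-- 	n = len(number)
-- 	base = 0
-- 	weights = []
-- 	for i, c in enumerate(number):
-- 		if c == "1":
-- 			base += 2 ** (n - 1 - i)
-- 		elif c == "X":
-- 			weights.append(2 ** (n - 1 - i))
-- 	res = [base]
-- 	for w in weights:
-- 		res = [r + a for r in res for a in (0, w)]
-- 	return res
-- ===== Notes on version B (the rewrite author's own statement) =====
-- stated objective: alternative
-- what changed: Replaces the branching recursion that rebuilds and rescans the whole string at every wildcard character with one pass extracting the base value and the wildcard-bit weights, followed by an iterative doubling of the result list in the same enumeration order.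
import Mathlib
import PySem

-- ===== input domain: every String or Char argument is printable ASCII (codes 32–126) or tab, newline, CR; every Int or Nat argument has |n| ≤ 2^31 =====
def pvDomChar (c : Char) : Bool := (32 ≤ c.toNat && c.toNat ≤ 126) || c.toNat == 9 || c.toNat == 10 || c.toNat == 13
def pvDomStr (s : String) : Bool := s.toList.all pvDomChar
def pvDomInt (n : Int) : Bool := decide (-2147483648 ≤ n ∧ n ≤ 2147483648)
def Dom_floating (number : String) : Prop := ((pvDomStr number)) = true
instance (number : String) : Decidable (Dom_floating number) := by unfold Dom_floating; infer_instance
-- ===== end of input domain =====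

-- B replaces A's branching recursion (which rebuilds and rescans the string at every wildcard character)
-- by one pass extracting the base value and X-bit weights plus an iterative doubling of the
-- result list, in the same enumeration order.

-- ===== PORT A =====
-- A's bin_to_dec loop: res accumulator, i the descending exponent (always ≥ 0 when used, so toNat is exact)
def binToDecLoop : List Char → Int → Int → Int
  | [], _, res => res
  | x :: xs, i, res => binToDecLoop xs (i - 1) (if x = '1' then res + 2 ^ i.toNat else res)

def bin_to_dec (number : String) : Int :=
  binToDecLoop number.toList ((number.toList.length : Int) - 1) 0

-- termination lemma for floatingAux: overwriting the first 'X' with a non-'X' char lowers the 'X' count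
theorem countX_set_firstX_lt : ∀ (cs : List Char) (c : Char), c ≠ 'X' → cs.count 'X' ≠ 0 →
    (cs.set (cs.idxOf 'X') c).count 'X' < cs.count 'X' := by
  intro cs
  induction cs with
  | nil => intro c _ h; simp at h
  | cons a cs ih =>
    intro c hc h
    by_cases ha : a = 'X'
    · subst ha
      simp [hc]
    · have hcount : cs.count 'X' ≠ 0 := by
        simpa [List.count_cons, ha] using h
      have hidx : (a :: cs).idxOf 'X' = cs.idxOf 'X' + 1 := by
        simp [ha]
      rw [hidx, List.set_cons_succ]
      simp only [List.count_cons]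
      have := ih c hc hcount
      omega

-- A's floating, on the character list (strings are rebuilt with String.mk exactly where A joins)
def floatingAux (cs : List Char) : List Int :=
  if h : cs.count 'X' = 0 then [bin_to_dec (String.ofList cs)]
  else
    let ind := cs.idxOf 'X'
    floatingAux (cs.set ind '0') ++ floatingAux (cs.set ind '1')
termination_by cs.count 'X'
decreasing_by
  · exact countX_set_firstX_lt cs '0' (by decide) h
  · exact countX_set_firstX_lt cs '1' (by decide) h

def floating (number : String) : List Int := floatingAux number.toList

-- ===== PORT B =====
def floating_alt (number : String) : List Int :=
  let cs := number.toList
  let n : Int := cs.length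
  let bw := (PySem.List.enumerate cs 0).foldl
    (fun (p : Int × List Int) ic =>
      if ic.2 = '1' then (p.1 + 2 ^ (n - 1 - ic.1).toNat, p.2)
      else if ic.2 = 'X' then (p.1, p.2 ++ [(2 : Int) ^ (n - 1 - ic.1).toNat])
      else p)
    ((0 : Int), ([] : List Int))
  bw.2.foldl (fun res w => res.flatMap (fun r => [r + 0, r + w])) [bw.1]

-- ===== PRECONDITION & SPEC =====
def Spec_floating (number : String) (out : List Int) : Prop := out = floating_alt number
instance (number : String) (out : List Int) : Decidable (Spec_floating number out) := by unfold Spec_floating; infer_instance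

-- ===== CLAIM (what is proved, stated in full; the proofs are below) =====
def Claim_equal_floating : Prop := ∀ (number : String), Dom_floating number → Spec_floating number (floating number)

-- ===== LEMMAS AND PROOFS =====

-- mathematical value of the '1' bits (positional weight of the head is 2^(length of the tail))
def bval : List Char → Int
  | [] => 0
  | c :: cs => (if c = '1' then (2 : Int) ^ cs.length else 0) + bval cs

-- the positional weights of the 'X' slots, left to right
def wtsL : List Char → List Int
  | [] => []
  | c :: cs => (if c = 'X' then [(2 : Int) ^ cs.length] else []) ++ wtsL cs

theorem binToDecLoop_eq : ∀ (cs : List Char) (res : Int),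
    binToDecLoop cs ((cs.length : Int) - 1) res = res + bval cs := by
  intro cs
  induction cs with
  | nil => intro res; simp [binToDecLoop, bval]
  | cons c cs ih =>
    intro res
    have hcast : ((c :: cs).length : Int) - 1 = (cs.length : Int) := by
      simp
    rw [hcast]
    show binToDecLoop cs ((cs.length : Int) - 1)
        (if c = '1' then res + 2 ^ ((cs.length : Int)).toNat else res) = res + bval (c :: cs)
    rw [ih]
    simp [bval]
    split_ifs <;> ring

theorem wtsL_eq_nil : ∀ (cs : List Char), cs.count 'X' = 0 → wtsL cs = [] := by
  intro cs
  induction cs with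
  | nil => intro _; rfl
  | cons c cs ih =>
    intro h
    have hc : ¬ c = 'X' := by
      intro hc; subst hc; simp at h
    have : cs.count 'X' = 0 := by simpa [List.count_cons, hc] using h
    simp [wtsL, hc, ih this]

-- behaviour of bval / wtsL when the first 'X' is overwritten
theorem split_firstX : ∀ (cs : List Char), cs.count 'X' ≠ 0 →
    bval (cs.set (cs.idxOf 'X') '0') = bval cs ∧
    bval (cs.set (cs.idxOf 'X') '1') = bval cs + 2 ^ (cs.length - 1 - cs.idxOf 'X') ∧
    wtsL cs = (2 : Int) ^ (cs.length - 1 - cs.idxOf 'X') :: wtsL (cs.set (cs.idxOf 'X') '0') ∧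
    wtsL (cs.set (cs.idxOf 'X') '1') = wtsL (cs.set (cs.idxOf 'X') '0') := by
  intro cs
  induction cs with
  | nil => intro h; simp at h
  | cons c cs ih =>
    intro h
    by_cases hc : c = 'X'
    · subst hc
      refine ⟨?_, ?_, ?_, ?_⟩ <;> simp [List.idxOf_cons, bval, wtsL] <;> ring
    · have hcount : cs.count 'X' ≠ 0 := by simpa [List.count_cons, hc] using h
      obtain ⟨ih0, ih1, ihw, ihe⟩ := ih hcount
      have hidx : (c :: cs).idxOf 'X' = cs.idxOf 'X' + 1 := by
        simp [List.idxOf_cons, hc]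
      have hlen : ∀ d, (cs.set (cs.idxOf 'X') d).length = cs.length := by
        intro d; simp
      have hexp : (c :: cs).length - 1 - ((cs.idxOf 'X') + 1) = cs.length - 1 - cs.idxOf 'X' := by
        simp; omega
      have e : cs.length - (cs.idxOf 'X' + 1) = cs.length - 1 - cs.idxOf 'X' := by omega
      refine ⟨?_, ?_, ?_, ?_⟩
      · simp [hidx, List.set_cons_succ, bval, hlen, ih0]
      · simp [hidx, List.set_cons_succ, bval, hlen, ih1]
        rw [e]
        ring
      · simp [hidx, List.set_cons_succ, wtsL, hc, hlen]
        rw [e, ihw]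
      · simp [hidx, List.set_cons_succ, wtsL, hlen, ihe]

-- the doubling step distributes over list append
theorem foldl_double_append : ∀ (ws : List Int) (xs ys : List Int),
    ws.foldl (fun res w => res.flatMap (fun r => [r + 0, r + w])) (xs ++ ys) =
      ws.foldl (fun res w => res.flatMap (fun r => [r + 0, r + w])) xs ++
      ws.foldl (fun res w => res.flatMap (fun r => [r + 0, r + w])) ys := by
  intro ws
  induction ws with
  | nil => intro xs ys; rfl
  | cons w ws ih =>
    intro xs ys
    simp only [List.foldl_cons, List.flatMap_append]
    exact ih _ _

-- characterisation of A: floatingAux lists base + subset sums in doubling order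
theorem floatingAux_eq : ∀ (n : Nat) (cs : List Char), cs.count 'X' = n →
    floatingAux cs = (wtsL cs).foldl (fun res w => res.flatMap (fun r => [r + 0, r + w])) [bval cs] := by
  intro n
  induction n using Nat.strong_induction_on with
  | _ n ih =>
    intro cs hn
    by_cases h : cs.count 'X' = 0
    · rw [floatingAux, dif_pos h, wtsL_eq_nil cs h]
      have hbd : bin_to_dec (String.ofList cs) = binToDecLoop cs ((cs.length : Int) - 1) 0 := by
        rw [bin_to_dec]
        have : (String.ofList cs).toList = cs := Eq.symm (String.ofList_eq.mp rfl)
        rw [this]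
      rw [hbd, binToDecLoop_eq]
      simp
    · rw [floatingAux, dif_neg h]
      show floatingAux (cs.set (cs.idxOf 'X') '0') ++ floatingAux (cs.set (cs.idxOf 'X') '1') =
        (wtsL cs).foldl (fun res w => res.flatMap (fun r => [r + 0, r + w])) [bval cs]
      obtain ⟨h0, h1, hw, he⟩ := split_firstX cs h
      have d0 : (cs.set (cs.idxOf 'X') '0').count 'X' < n :=
        hn ▸ countX_set_firstX_lt cs '0' (by decide) h
      have d1 : (cs.set (cs.idxOf 'X') '1').count 'X' < n :=
        hn ▸ countX_set_firstX_lt cs '1' (by decide) h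
      rw [ih _ d0 _ rfl, ih _ d1 _ rfl, h0, h1, he, hw, List.foldl_cons]
      have hstep : ([bval cs].flatMap
          (fun r => [r + 0, r + (2 : Int) ^ (cs.length - 1 - cs.idxOf 'X')])) =
          [bval cs] ++ [bval cs + 2 ^ (cs.length - 1 - cs.idxOf 'X')] := by
        simp
      rw [hstep, foldl_double_append]

-- B's first fold computes (bval, wtsL)
theorem foldB_eq : ∀ (cs : List Char) (k : Nat) (n : Int) (b : Int) (ws : List Int),
    n = (k : Int) + cs.length →
    (PySem.List.enumerate cs (k : Int)).foldl
      (fun (p : Int × List Int) ic =>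
        if ic.2 = '1' then (p.1 + 2 ^ (n - 1 - ic.1).toNat, p.2)
        else if ic.2 = 'X' then (p.1, p.2 ++ [(2 : Int) ^ (n - 1 - ic.1).toNat])
        else p) (b, ws) = (b + bval cs, ws ++ wtsL cs) := by
  intro cs
  induction cs with
  | nil => intro k n b ws hn; simp [PySem.List.enumerate_nil, bval, wtsL]
  | cons c cs ih =>
    intro k n b ws hn
    have hexp : (n - 1 - (k : Int)).toNat = cs.length := by
      have : n - 1 - (k : Int) = (cs.length : Int) := by
        rw [hn]; push_cast [List.length_cons]; omega
      rw [this, Int.toNat_natCast]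
    have hn' : n = ((k + 1 : Nat) : Int) + cs.length := by
      rw [hn]; push_cast [List.length_cons]; omega
    rw [PySem.List.enumerate_cons]
    simp only [List.foldl_cons]
    by_cases h1 : c = '1'
    · subst h1
      have : ((k : Int) + 1) = ((k + 1 : Nat) : Int) := by push_cast; ring
      simp only [if_pos rfl, hexp, this]
      rw [ih (k + 1) n _ _ hn']
      simp [bval, wtsL]
      ring
    · by_cases hX : c = 'X'
      · subst hX
        have : ((k : Int) + 1) = ((k + 1 : Nat) : Int) := by push_cast; ring
        simp only [if_neg (by decide : ¬ ('X' = '1')), if_pos rfl, hexp, this]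
        rw [ih (k + 1) n _ _ hn']
        simp [bval, wtsL]
      · have : ((k : Int) + 1) = ((k + 1 : Nat) : Int) := by push_cast; ring
        simp only [if_neg h1, if_neg hX, this]
        rw [ih (k + 1) n _ _ hn']
        simp [bval, wtsL, h1, hX]

-- ===== VERDICT (by name: the statement is the Claim_ definition above) =====
theorem floating_spec : Claim_equal_floating := by
  intro number _
  unfold Spec_floating floating
  simp only [floating_alt]
  have hb := foldB_eq number.toList 0 (number.toList.length : Int) 0 [] (by simp)
  simp only [Int.natCast_zero] at hb
  rw [hb]
  simpa using floatingAux_eq (number.toList.count 'X') number.toList rfl
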